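-- pv_equiv track=rewrite | github.com/cirosantilli/cirosantilli.github.io | euler/973.py | S_k_value
-- ===== SOURCE A (Python) =====
-- MOD = 10**9 + 7
--
-- def S_k_value(N: int, k: int, mod: int = MOD) -> int:
--     if k == 0:
--         if N == 0:
--             return 1
--         return (-pow(mod - 2, N - 1, mod)) % mod
--     B = 1 << k
--     period = B << 1
--     S = [0] * (N + 1)
--     P = [0] * (N + 1)
--     S[0] = 1
--     P[0] = 1
--     PP = P
--     SS = S
--     m = mod
--     per_mask = period - 1
--     for n in range(1, N + 1):
--         val = 0
--         s = 1
--         while s <= n: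
--             p = s & per_mask
--             if p < B:
--                 sign = 1
--                 e = s + (B - p) - 1
--             else:
--                 sign = -1
--                 e = s + (period - p) - 1
--             if e > n:
--                 e = n
--             t_lo = n - e
--             t_hi = n - s
--             if t_lo == 0:
--                 sum_range = PP[t_hi]
--             else:
--                 sum_range = PP[t_hi] - PP[t_lo - 1]
--             val += sign * sum_range
--             s = e + 1
--         SS[n] = val % m
--         PP[n] = (PP[n - 1] + SS[n]) % m
--     return SS[N]
-- ===== SOURCE B (Python) =====
-- MOD = 10**9 + 7
--
-- def S_k_value(N: int, k: int, mod: int = MOD) -> int: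
--     if k == 0:
--         if N == 0:
--             return 1
--         return (-pow(mod - 2, N - 1, mod)) % mod
--     B = 1 << k
--     period = 2 * B
--     # Linear recurrence: with sign(s) = +1 if s % period < B else -1, the signed
--     # convolution T[n] = sum_{s=1..n} sign(s)*S[n-s] satisfies
--     #   T[n] = S[n-1] + T[n-1] - 2*U[n] + 2*V[n],
--     # where U[n]/V[n] sum S[j] over j <= n-2 in the residue classes of n-B and n
--     # mod period.  U and V themselves satisfy O(1) recurrences (drop back by one
--     # period), so each step is O(1) small-int work.
--     S = [0] * (N + 1)
--     S[0] = 1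
--     U = [0] * (N + 1)  # U[n] = sum of S[j], j <= n-2, j = n-B (mod period)
--     V = [0] * (N + 1)  # V[n] = sum of S[j], j <= n-2, j = n   (mod period)
--     t = 0
--     for n in range(1, N + 1):
--         u = (S[n - B] if n >= B else 0) + (U[n - period] if n >= period else 0)
--         v = (S[n - period] + V[n - period]) if n >= period else 0
--         U[n] = u
--         V[n] = v
--         t = (S[n - 1] + t - 2 * u + 2 * v) % mod
--         S[n] = t
--     return S[N]
-- ===== Notes on version B (the rewrite author's own statement) =====
-- stated objective: faster
-- what changed: Replaces A's per-n inner scan over sign blocks backed by a prefix-sum array with the closed linear recurrence T[n] = S[n-1] + T[n-1] - 2*U[n] + 2*V[n], where the residue-class window sums U and V are themselves maintained by O(1) drop-back-one-period recurrences, making each step O(1).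
-- outside the precondition, e.g. on S_k_value(-1, 0, 7): A returns 5, B returns 5
import Mathlib
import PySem

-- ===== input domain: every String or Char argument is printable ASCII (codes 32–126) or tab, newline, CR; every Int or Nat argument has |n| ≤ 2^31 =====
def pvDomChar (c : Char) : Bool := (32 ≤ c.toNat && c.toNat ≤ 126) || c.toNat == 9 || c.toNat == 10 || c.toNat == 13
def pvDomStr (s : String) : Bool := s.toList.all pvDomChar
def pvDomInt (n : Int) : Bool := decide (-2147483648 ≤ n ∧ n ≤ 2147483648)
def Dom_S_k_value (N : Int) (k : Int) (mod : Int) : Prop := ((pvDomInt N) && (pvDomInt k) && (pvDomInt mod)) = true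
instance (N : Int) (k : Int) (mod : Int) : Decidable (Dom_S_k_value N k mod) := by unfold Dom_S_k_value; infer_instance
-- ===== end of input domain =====

-- B replaces A's per-n block scan over a prefix-sum array by an O(1)-per-step linear
-- recurrence whose residue-class window sums are maintained by array recurrences
-- (objective: faster, asymptotic).

-- ===== PORT A =====
-- the inner `while s <= n` loop of A; `fuel` only makes the loop total (one unit per iteration,
-- the caller passes enough for every iteration the Python loop performs)
def aInnerA (PP : List Int) (B period perMask n : Int) : Nat → Int → Int → Int
  | 0, _s, val => val
  | fuel+1, s, val =>
    if s ≤ n then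
      let p := PySem.Int.band s perMask            -- s & per_mask
      let sign : Int := if p < B then 1 else -1
      let e0 : Int := if p < B then s + (B - p) - 1 else s + (period - p) - 1
      let e := if e0 > n then n else e0
      let tlo := n - e
      let thi := n - s
      let sumRange := if tlo = 0 then PySem.List.pyGetD PP thi 0
        else PySem.List.pyGetD PP thi 0 - PySem.List.pyGetD PP (tlo - 1) 0
      aInnerA PP B period perMask n fuel (e + 1) (val + sign * sumRange)
    else val

def S_k_value (N : Int) (k : Int) (mod : Int) : Int :=
  if k = 0 then
    if N = 0 then 1
    else PySem.Int.mod (-(PySem.Int.powMod (mod - 2) (N - 1).toNat mod)) mod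
  else
    let B : Int := (1 : Int) <<< k.toNat          -- 1 << k (k < 0 raises in Python: outside Pre_)
    let period : Int := B <<< (1 : Nat)           -- B << 1
    let S0 : List Int := List.replicate (N + 1).toNat 0
    let P0 : List Int := List.replicate (N + 1).toNat 0
    let SS0 := PySem.List.pySetD S0 0 1           -- S[0] = 1
    let PP0 := PySem.List.pySetD P0 0 1           -- P[0] = 1
    let m := mod
    let perMask := period - 1
    let st := (PySem.List.pyRange 1 (N + 1) 1).foldl (fun (st : List Int × List Int) n =>
        let SS := st.1
        let PP := st.2
        let val := aInnerA PP B period perMask n (n.toNat + 1) 1 0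
        let sn := PySem.Int.mod val m             -- SS[n] = val % m
        let SS' := PySem.List.pySetD SS n sn
        let PP' := PySem.List.pySetD PP n (PySem.Int.mod (PySem.List.pyGetD PP (n - 1) 0 + sn) m)
        (SS', PP')) (SS0, PP0)
    PySem.List.pyGetD st.1 N 0                    -- SS[N]

-- ===== PORT B =====
def S_k_value_alt (N : Int) (k : Int) (mod : Int) : Int :=
  if k = 0 then
    if N = 0 then 1
    else PySem.Int.mod (-(PySem.Int.powMod (mod - 2) (N - 1).toNat mod)) mod
  else
    let B : Int := (1 : Int) <<< k.toNat          -- 1 << k (k < 0 raises in Python: outside Pre_)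
    let period : Int := 2 * B
    let S0 := PySem.List.pySetD (List.replicate (N + 1).toNat 0) 0 1    -- S[0] = 1
    let U0 : List Int := List.replicate (N + 1).toNat 0
    let V0 : List Int := List.replicate (N + 1).toNat 0
    let st := (PySem.List.pyRange 1 (N + 1) 1).foldl
      (fun (st : List Int × List Int × List Int × Int) n =>
        let S := st.1
        let U := st.2.1
        let V := st.2.2.1
        let t := st.2.2.2
        let u := (if B ≤ n then PySem.List.pyGetD S (n - B) 0 else 0)
                 + (if period ≤ n then PySem.List.pyGetD U (n - period) 0 else 0)
        let v := if period ≤ n then PySem.List.pyGetD S (n - period) 0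
                    + PySem.List.pyGetD V (n - period) 0 else 0
        let t' := PySem.Int.mod (PySem.List.pyGetD S (n - 1) 0 + t - 2 * u + 2 * v) mod
        (PySem.List.pySetD S n t', PySem.List.pySetD U n u, PySem.List.pySetD V n v, t'))
      (S0, U0, V0, 0)
    PySem.List.pyGetD st.1 N 0                    -- S[N]

-- ===== PRECONDITION & SPEC =====
-- Pre_ excludes exactly the inputs where the Python A raises: k < 0 (ValueError from 1 << k),
-- mod = 0 with N ≥ 1 (ZeroDivisionError/ValueError from %/pow), and N < 0 (IndexError for k ≠ 0;
-- for k = 0 a negative N takes pow's modular-inverse path, which the ports do not model — on the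
-- odd moduli where that pow still returns, A and B share the identical k == 0 branch).
def Pre_S_k_value (N : Int) (k : Int) (mod : Int) : Prop :=
  0 ≤ N ∧ 0 ≤ k ∧ (mod ≠ 0 ∨ N = 0)
instance (N : Int) (k : Int) (mod : Int) : Decidable (Pre_S_k_value N k mod) := by
  unfold Pre_S_k_value; infer_instance

def pvWitness_S_k_value : Int × Int × Int := (6, 1, 97)

def Spec_S_k_value (N : Int) (k : Int) (mod : Int) (out : Int) : Prop := out = S_k_value_alt N k mod
instance (N : Int) (k : Int) (mod : Int) (out : Int) : Decidable (Spec_S_k_value N k mod out) := by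
  unfold Spec_S_k_value; infer_instance

-- ===== CLAIM (what is proved, stated in full; the proofs are below) =====
def Claim_equal_S_k_value : Prop := ∀ (N : Int) (k : Int) (mod : Int), Dom_S_k_value N k mod → Pre_S_k_value N k mod → Spec_S_k_value N k mod (S_k_value N k mod)

-- ===== LEMMAS AND PROOFS =====

-- ---------- generic modular-arithmetic helpers (Python % is Int.fmod) ----------
theorem fmod_sub_self_dvd (m a : Int) : m ∣ a - Int.fmod a m := by
  refine ⟨a.fdiv m, ?_⟩
  have := Int.fmod_add_mul_fdiv a m
  linarith

theorem fmod_congr {m a b : Int} (h : m ∣ a - b) : Int.fmod a m = Int.fmod b m := by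
  obtain ⟨t, ht⟩ := h
  have : a = b + m * t := by linarith
  rw [this, Int.add_mul_fmod_self_left]

theorem fmod_eq_fmod_iff_dvd_sub (m a b : Int) : Int.fmod a m = Int.fmod b m ↔ m ∣ a - b := by
  constructor
  · intro h
    have h1 := fmod_sub_self_dvd m a
    have h2 := fmod_sub_self_dvd m b
    have : a - b = (a - Int.fmod a m) - (b - Int.fmod b m) := by rw [h]; ring
    rw [this]; exact dvd_sub h1 h2
  · exact fmod_congr

theorem natmod_eq_iff_int_dvd (x r P : Nat) (h : r < P) :
    x % P = r ↔ (P:Int) ∣ (x:Int) - (r:Int) := by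
  constructor
  · intro hx
    refine ⟨((x / P : Nat) : Int), ?_⟩
    have h2 : x = r + P * (x / P) := by
      have := Nat.mod_add_div x P
      omega
    have h3 : (x:Int) = (r:Int) + (P:Int) * ((x / P : Nat) : Int) := by exact_mod_cast h2
    linarith
  · rintro ⟨t, ht⟩
    have hP0 : (0:Int) < (P:Int) := by exact_mod_cast Nat.pos_of_ne_zero (by omega)
    have hx0 : (0:Int) ≤ (x:Int) := Int.natCast_nonneg x
    have hr : (r:Int) < (P:Int) := by exact_mod_cast h
    have ht0 : 0 ≤ t := by nlinarith
    have hxe : (x:Int) = (r:Int) + (P:Int) * (t.toNat : Int) := by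
      rw [Int.toNat_of_nonneg ht0]; linarith
    have hxn : x = r + P * t.toNat := by exact_mod_cast hxe
    rw [hxn, Nat.add_mul_mod_self_left, Nat.mod_eq_of_lt h]

-- ---------- the reference recurrence ----------
def refSgn (P bN : Nat) (s : Nat) : Int := if s % P < bN then 1 else -1

def refS (m : Int) (P bN : Nat) : Nat → Int
  | 0 => 1
  | n+1 => Int.fmod (∑ s ∈ Finset.range (n+1), refSgn P bN (s+1) * refS m P bN (n - s)) m
termination_by n => n
decreasing_by omega

def refT (m : Int) (P bN : Nat) (n : Nat) : Int :=
  ∑ s ∈ Finset.range n, refSgn P bN (s+1) * refS m P bN (n - 1 - s)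

def refW (m : Int) (P bN : Nat) (n : Nat) (c : Int) : Int :=
  ∑ j ∈ Finset.range (n-1),
    if Int.fmod (j:Int) (P:Int) = Int.fmod c (P:Int) then refS m P bN j else 0

theorem refS_succ (m : Int) (P bN : Nat) (n : Nat) :
    refS m P bN (n+1) = Int.fmod (refT m P bN (n+1)) m := by
  rw [refS, refT]
  simp only [Nat.add_sub_cancel]

theorem refSgn_succ (P bN : Nat) (hP : P = 2*bN) (hB : 2 ≤ bN) (t : Nat) :
    refSgn P bN (t+1) = refSgn P bN t +
      ((if t % P = bN - 1 then (-2:Int) else 0) + (if t % P = P - 1 then 2 else 0)) := by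
  have hP0 : 0 < P := by omega
  have hr : t % P < P := Nat.mod_lt _ hP0
  have h2 : (t+1) % P = if t % P = P - 1 then 0 else t % P + 1 := by
    have h1 : (t+1) % P = (t % P + 1 % P) % P := Nat.add_mod t 1 P
    rw [Nat.mod_eq_of_lt (show 1 < P by omega)] at h1
    rw [h1]
    split_ifs with h
    · rw [h, show P - 1 + 1 = P by omega, Nat.mod_self]
    · exact Nat.mod_eq_of_lt (by omega)
  unfold refSgn
  rw [h2]
  split_ifs <;> omega

theorem reflect_ite_sum (f : Nat → Int) (P : Nat) (n c0 : Nat) (cI : Int)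
    (hc : ∀ j, j < n → (((n - j) % P = c0) ↔ Int.fmod (j:Int) (P:Int) = Int.fmod cI (P:Int))) :
    ∑ i ∈ Finset.range n, (if (i+1) % P = c0 then f (n-1-i) else 0)
      = ∑ j ∈ Finset.range n, (if Int.fmod (j:Int) (P:Int) = Int.fmod cI (P:Int) then f j else 0) := by
  have h1 : ∀ i ∈ Finset.range n,
      (if (i+1) % P = c0 then f (n-1-i) else 0)
        = (fun j => if (n - j) % P = c0 then f j else 0) (n-1-i) := by
    intro i hi
    simp only [Finset.mem_range] at hi
    simp only []
    rw [show n - (n-1-i) = i+1 by omega]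
  calc ∑ i ∈ Finset.range n, (if (i+1) % P = c0 then f (n-1-i) else 0)
      = ∑ i ∈ Finset.range n, (fun j => if (n - j) % P = c0 then f j else 0) (n-1-i) :=
        Finset.sum_congr rfl h1
    _ = ∑ j ∈ Finset.range n, (fun j => if (n - j) % P = c0 then f j else 0) j :=
        Finset.sum_range_reflect (fun j => if (n - j) % P = c0 then f j else 0) n
    _ = ∑ j ∈ Finset.range n, (if Int.fmod (j:Int) (P:Int) = Int.fmod cI (P:Int) then f j else 0) :=
        Finset.sum_congr rfl (fun j hj => by
          simp only []
          rw [if_congr (hc j (by simpa using hj)) rfl rfl])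

theorem refT_succ (m : Int) (P bN : Nat) (hP : P = 2*bN) (hB : 2 ≤ bN) (n : Nat) :
    refT m P bN (n+1) = refS m P bN n + refT m P bN n
      - 2 * refW m P bN (n+1) ((n:Int) + 1 - (bN:Int))
      + 2 * refW m P bN (n+1) ((n:Int) + 1) := by
  have hP0 : 0 < P := by omega
  have hT1 : refT m P bN (n+1)
      = ∑ s ∈ Finset.range (n+1), refSgn P bN (s+1) * refS m P bN (n - s) := by
    unfold refT
    simp only [Nat.add_sub_cancel]
  rw [hT1, Finset.sum_range_succ' (fun s => refSgn P bN (s+1) * refS m P bN (n - s)) n]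
  have hsg1 : refSgn P bN 1 = 1 := by
    unfold refSgn
    rw [Nat.mod_eq_of_lt (by omega), if_pos (by omega)]
  have hstep : ∀ i ∈ Finset.range n,
      refSgn P bN (i+1+1) * refS m P bN (n - (i+1))
        = refSgn P bN (i+1) * refS m P bN (n-1-i)
          + ((if (i+1) % P = bN - 1 then (-2:Int) * refS m P bN (n-1-i) else 0)
             + (if (i+1) % P = P - 1 then (2:Int) * refS m P bN (n-1-i) else 0)) := by
    intro i _
    rw [refSgn_succ P bN hP hB (i+1), show n - (i+1) = n-1-i by omega]
    split_ifs <;> ring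
  rw [Finset.sum_congr rfl hstep]
  rw [Finset.sum_add_distrib, Finset.sum_add_distrib]
  have hc1 : ∀ j, j < n → (((n - j) % P = bN - 1)
      ↔ Int.fmod (j:Int) (P:Int) = Int.fmod ((n:Int) + 1 - (bN:Int)) (P:Int)) := by
    intro j hj
    rw [fmod_eq_fmod_iff_dvd_sub, natmod_eq_iff_int_dvd _ _ _ (by omega)]
    rw [Nat.cast_sub (le_of_lt hj), Nat.cast_sub (show 1 ≤ bN by omega), Nat.cast_one]
    rw [show (n:Int) - (j:Int) - ((bN:Int) - 1) = -((j:Int) - ((n:Int) + 1 - (bN:Int))) by ring,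
        Int.dvd_neg]
  have hc2 : ∀ j, j < n → (((n - j) % P = P - 1)
      ↔ Int.fmod (j:Int) (P:Int) = Int.fmod ((n:Int) + 1) (P:Int)) := by
    intro j hj
    rw [fmod_eq_fmod_iff_dvd_sub, natmod_eq_iff_int_dvd _ _ _ (by omega)]
    rw [Nat.cast_sub (le_of_lt hj), Nat.cast_sub (show 1 ≤ P by omega), Nat.cast_one]
    rw [show (n:Int) - (j:Int) - ((P:Int) - 1) = -(((j:Int) - ((n:Int) + 1)) + (P:Int)) by ring,
        Int.dvd_neg]
    constructor
    · intro h
      have h2 := dvd_sub h (dvd_refl (P:Int))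
      simpa using h2
    · intro h
      exact dvd_add h (dvd_refl _)
  have e1 : ∑ i ∈ Finset.range n, (if (i+1) % P = bN - 1 then (-2:Int) * refS m P bN (n-1-i) else 0)
      = -2 * refW m P bN (n+1) ((n:Int) + 1 - (bN:Int)) := by
    unfold refW
    simp only [Nat.add_sub_cancel]
    rw [← reflect_ite_sum (refS m P bN) P n (bN - 1) _ hc1, Finset.mul_sum]
    exact Finset.sum_congr rfl (fun i _ => by split_ifs <;> ring)
  have e2 : ∑ i ∈ Finset.range n, (if (i+1) % P = P - 1 then (2:Int) * refS m P bN (n-1-i) else 0)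
      = 2 * refW m P bN (n+1) ((n:Int) + 1) := by
    unfold refW
    simp only [Nat.add_sub_cancel]
    rw [← reflect_ite_sum (refS m P bN) P n (P - 1) _ hc2, Finset.mul_sum]
    exact Finset.sum_congr rfl (fun i _ => by split_ifs <;> ring)
  rw [e1, e2, hsg1]
  have : ∑ i ∈ Finset.range n, refSgn P bN (i+1) * refS m P bN (n-1-i) = refT m P bN n := rfl
  rw [this]
  simp only [Nat.sub_zero]
  ring

-- ---------- A-side ----------
def refPP (m : Int) (P bN : Nat) : Nat → Int
  | 0 => 1
  | j+1 => Int.fmod (refPP m P bN j + refS m P bN (j+1)) m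

theorem refPP_cong (m : Int) (P bN : Nat) (j : Nat) :
    m ∣ refPP m P bN j - ∑ i ∈ Finset.range (j+1), refS m P bN i := by
  induction j with
  | zero => simp [refPP, refS]
  | succ j ih =>
    rw [refPP, Finset.sum_range_succ]
    have h1 := fmod_sub_self_dvd m (refPP m P bN j + refS m P bN (j+1))
    have : Int.fmod (refPP m P bN j + refS m P bN (j+1)) m
        - (∑ i ∈ Finset.range (j+1), refS m P bN i + refS m P bN (j+1))
        = -(refPP m P bN j + refS m P bN (j+1)
            - Int.fmod (refPP m P bN j + refS m P bN (j+1)) m)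
          + (refPP m P bN j - ∑ i ∈ Finset.range (j+1), refS m P bN i) := by ring
    rw [this]
    exact dvd_add (dvd_neg.mpr h1) ih

theorem mod_add_small (a d P : Nat) (h : a % P + d < P) : (a + d) % P = a % P + d := by
  conv_lhs => rw [← Nat.mod_add_div a P]
  rw [Nat.add_right_comm, Nat.add_mul_mod_self_left]
  exact Nat.mod_eq_of_lt h

theorem refSgn_const_pos (P bN : Nat) (s d : Nat) (hbP : bN ≤ P) (h : s % P + d < bN) :
    refSgn P bN (s + d) = 1 := by
  unfold refSgn
  rw [mod_add_small s d P (by omega), if_pos (by omega)]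

theorem refSgn_const_neg (P bN : Nat) (s d : Nat) (hge : bN ≤ s % P) (h : s % P + d < P) :
    refSgn P bN (s + d) = -1 := by
  unfold refSgn
  rw [mod_add_small s d P h, if_neg (by omega)]

theorem sum_block_reflect (f : Nat → Int) (s e n : Nat) (hse : s ≤ e) (hen : e ≤ n) :
    ∑ s' ∈ Finset.Ico s (e+1), f (n - s') = ∑ j ∈ Finset.Ico (n-e) (n-s+1), f j := by
  rw [Finset.sum_Ico_eq_sum_range, Finset.sum_Ico_eq_sum_range]
  rw [show (n-s+1)-(n-e) = e+1-s by omega]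
  calc ∑ i ∈ Finset.range (e+1-s), f (n - (s+i))
      = ∑ i ∈ Finset.range (e+1-s), (fun i => f (n-e+i)) ((e+1-s) - 1 - i) := by
        refine Finset.sum_congr rfl fun i hi => ?_
        simp only [Finset.mem_range] at hi
        simp only []
        congr 1
        omega
    _ = ∑ i ∈ Finset.range (e+1-s), f (n-e+i) :=
        Finset.sum_range_reflect (fun i => f (n-e+i)) (e+1-s)

theorem sum_range_sub_range (f : Nat → Int) (tlo thi : Nat) (h : tlo ≤ thi + 1) :
    (∑ i ∈ Finset.range (thi+1), f i) - (∑ i ∈ Finset.range tlo, f i)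
      = ∑ i ∈ Finset.Ico tlo (thi+1), f i := by
  rw [← Finset.sum_range_add_sum_Ico f h]
  ring

theorem block_step (m : Int) (P bN : Nat) (σ : Int) (sN eN nN : Nat)
    (hse : sN ≤ eN) (hen : eN ≤ nN)
    (hsgn : ∀ s', sN ≤ s' → s' ≤ eN → refSgn P bN s' = σ)
    (sumRange : Int)
    (hsum : m ∣ sumRange - ∑ j ∈ Finset.Ico (nN-eN) (nN-sN+1), refS m P bN j) :
    m ∣ σ * sumRange - ∑ s' ∈ Finset.Ico sN (eN+1), refSgn P bN s' * refS m P bN (nN - s') := by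
  have h1 : ∑ s' ∈ Finset.Ico sN (eN+1), refSgn P bN s' * refS m P bN (nN - s')
      = σ * ∑ s' ∈ Finset.Ico sN (eN+1), refS m P bN (nN - s') := by
    rw [Finset.mul_sum]
    refine Finset.sum_congr rfl fun s' hs' => ?_
    simp only [Finset.mem_Ico] at hs'
    rw [hsgn s' hs'.1 (by omega)]
  rw [h1, sum_block_reflect _ _ _ _ hse hen]
  have h2 := Dvd.dvd.mul_left hsum σ
  have h3 : σ * (sumRange - ∑ j ∈ Finset.Ico (nN-eN) (nN-sN+1), refS m P bN j)
      = σ * sumRange - σ * ∑ j ∈ Finset.Ico (nN-eN) (nN-sN+1), refS m P bN j := by ring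
  rwa [h3] at h2

theorem sumRange_cong (m : Int) (P bN : Nat) (PP : List Int) (nN sN eN : Nat)
    (hs : 1 ≤ sN) (hse : sN ≤ eN) (hen : eN ≤ nN)
    (hPP : ∀ j : Nat, j < nN → PySem.List.pyGetD PP (j:Int) 0 = refPP m P bN j) :
    m ∣ (if ((nN:Int) - (eN:Int)) = 0 then PySem.List.pyGetD PP ((nN:Int)-(sN:Int)) 0
         else PySem.List.pyGetD PP ((nN:Int)-(sN:Int)) 0
              - PySem.List.pyGetD PP (((nN:Int)-(eN:Int)) - 1) 0)
        - ∑ j ∈ Finset.Ico (nN-eN) (nN-sN+1), refS m P bN j := by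
  have hthi : ((nN:Int) - (sN:Int)) = ((nN - sN : Nat) : Int) := by push_cast [Nat.cast_sub (by omega : sN ≤ nN)]; ring
  have hthiPP : PySem.List.pyGetD PP ((nN:Int)-(sN:Int)) 0 = refPP m P bN (nN - sN) := by
    rw [hthi]; exact hPP (nN - sN) (by omega)
  by_cases h0 : eN = nN
  · rw [if_pos (by rw [h0]; ring)]
    rw [hthiPP, h0, Nat.sub_self]
    have hc := refPP_cong m P bN (nN - sN)
    rw [show Finset.Ico 0 (nN - sN + 1) = Finset.range (nN - sN + 1) by rw [Finset.range_eq_Ico]]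
    exact hc
  · have hlt : eN < nN := by omega
    rw [if_neg (by
      intro hcon
      have : (nN:Int) = (eN:Int) := by linarith
      exact h0 (by exact_mod_cast this.symm))]
    have htlo : ((nN:Int) - (eN:Int)) - 1 = ((nN - eN - 1 : Nat) : Int) := by
      push_cast [Nat.cast_sub (by omega : 1 ≤ nN - eN), Nat.cast_sub (by omega : eN ≤ nN)]; ring
    rw [hthiPP, htlo, hPP (nN - eN - 1) (by omega)]
    have hc1 := refPP_cong m P bN (nN - sN)
    have hc2 := refPP_cong m P bN (nN - eN - 1)
    have hsplit : (∑ i ∈ Finset.range (nN - sN + 1), refS m P bN i)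
        - (∑ i ∈ Finset.range (nN - eN - 1 + 1), refS m P bN i)
        = ∑ j ∈ Finset.Ico (nN-eN) (nN-sN+1), refS m P bN j := by
      rw [show nN - eN - 1 + 1 = nN - eN by omega]
      exact sum_range_sub_range (refS m P bN) (nN - eN) (nN - sN) (by omega)
    have : refPP m P bN (nN - sN) - refPP m P bN (nN - eN - 1)
          - ∑ j ∈ Finset.Ico (nN-eN) (nN-sN+1), refS m P bN j
        = (refPP m P bN (nN - sN) - ∑ i ∈ Finset.range (nN - sN + 1), refS m P bN i)
          - (refPP m P bN (nN - eN - 1) - ∑ i ∈ Finset.range (nN - eN - 1 + 1), refS m P bN i)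
          + ((∑ i ∈ Finset.range (nN - sN + 1), refS m P bN i)
             - (∑ i ∈ Finset.range (nN - eN - 1 + 1), refS m P bN i)
             - ∑ j ∈ Finset.Ico (nN-eN) (nN-sN+1), refS m P bN j) := by ring
    rw [this, hsplit, sub_self, add_zero]
    exact dvd_sub hc1 hc2

theorem aInnerA_spec (m : Int) (P bN : Nat) (hP : P = 2*bN) (hB : 2 ≤ bN)
    (hpow : ∃ t, P = 2^t) (PP : List Int) (nN : Nat)
    (hPP : ∀ j : Nat, j < nN → PySem.List.pyGetD PP (j:Int) 0 = refPP m P bN j) :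
    ∀ (fuel : Nat) (sN : Nat) (val : Int), 1 ≤ sN → nN < sN + fuel →
      m ∣ aInnerA PP (bN:Int) (P:Int) ((P:Int)-1) (nN:Int) fuel (sN:Int) val
          - (val + ∑ s' ∈ Finset.Ico sN (nN+1), refSgn P bN s' * refS m P bN (nN - s')) := by
  intro fuel
  induction fuel with
  | zero =>
    intro sN val hs hlt
    rw [Finset.Ico_eq_empty_of_le (by omega), Finset.sum_empty]
    simp [aInnerA]
  | succ fuel ih =>
    intro sN val hs hlt
    by_cases hsn : sN ≤ nN
    case neg =>
      rw [Finset.Ico_eq_empty_of_le (by omega), Finset.sum_empty]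
      simp only [aInnerA]
      rw [if_neg (by exact_mod_cast hsn)]
      simp
    case pos =>
      obtain ⟨tt, hPt⟩ := hpow
      have hP0 : 0 < P := by omega
      have hr : sN % P < P := Nat.mod_lt _ hP0
      have hmask : ((P:Int) - 1) = ((P - 1 : Nat) : Int) := by omega
      have hband : PySem.Int.band ((sN:Nat):Int) ((P:Int)-1) = ((sN % P : Nat) : Int) := by
        rw [hmask, PySem.Int.band_natCast]
        congr 1
        rw [hPt]
        exact Nat.and_two_pow_sub_one_eq_mod sN tt
      simp only [aInnerA, hband]
      rw [if_pos (show ((sN:Nat):Int) ≤ ((nN:Nat):Int) by exact_mod_cast hsn)]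
      by_cases hbr : sN % P < bN
      case pos =>
        have hblt : ((sN % P : Nat):Int) < ((bN:Nat):Int) := by exact_mod_cast hbr
        rw [if_pos hblt, if_pos hblt]
        set eN : Nat := if nN < sN + (bN - sN % P) - 1 then nN else sN + (bN - sN % P) - 1 with heN_def
        have hse : sN ≤ eN := by
          rw [heN_def]; split_ifs <;> omega
        have hen : eN ≤ nN := by
          rw [heN_def]; split_ifs <;> omega
        have he : (if ((sN:Nat):Int) + (((bN:Nat):Int) - ((sN % P : Nat):Int)) - 1 > ((nN:Nat):Int)
              then ((nN:Nat):Int) else ((sN:Nat):Int) + (((bN:Nat):Int) - ((sN % P : Nat):Int)) - 1)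
            = ((eN:Nat):Int) := by
          rw [heN_def]; split_ifs <;> omega
        rw [he]
        have hsgn : ∀ s', sN ≤ s' → s' ≤ eN → refSgn P bN s' = 1 := by
          intro s' h1 h2
          rw [show s' = sN + (s' - sN) by omega]
          refine refSgn_const_pos P bN sN (s' - sN) (by omega) (by
            have : eN ≤ sN + (bN - sN % P) - 1 := by rw [heN_def]; split_ifs <;> omega
            omega)
        have hsum := sumRange_cong m P bN PP nN sN eN hs hse hen hPP
        have hblock := block_step m P bN 1 sN eN nN hse hen hsgn _ hsum
        have hrec := ih (eN+1) (val + 1 *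
            (if ((nN:Nat):Int) - ((eN:Nat):Int) = 0 then PySem.List.pyGetD PP (((nN:Nat):Int)-((sN:Nat):Int)) 0
             else PySem.List.pyGetD PP (((nN:Nat):Int)-((sN:Nat):Int)) 0
                  - PySem.List.pyGetD PP ((((nN:Nat):Int)-((eN:Nat):Int)) - 1) 0))
            (by omega) (by omega)
        have hcast : (((eN:Nat):Int) + 1) = (((eN+1 : Nat)):Int) := by omega
        rw [hcast]
        have hsplit := Finset.sum_Ico_consecutive
          (fun s' => refSgn P bN s' * refS m P bN (nN - s'))
          (show sN ≤ eN+1 by omega) (show eN+1 ≤ nN+1 by omega)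
        obtain ⟨u, hu⟩ := hrec
        obtain ⟨v, hv⟩ := hblock
        exact ⟨u + v, by linear_combination hu + hv + hsplit⟩
      case neg =>
        have hblt : ¬ (((sN % P : Nat):Int) < ((bN:Nat):Int)) := by exact_mod_cast hbr
        rw [if_neg hblt, if_neg hblt]
        set eN : Nat := if nN < sN + (P - sN % P) - 1 then nN else sN + (P - sN % P) - 1 with heN_def
        have hse : sN ≤ eN := by
          rw [heN_def]; split_ifs <;> omega
        have hen : eN ≤ nN := by
          rw [heN_def]; split_ifs <;> omega
        have he : (if ((sN:Nat):Int) + (((P:Nat):Int) - ((sN % P : Nat):Int)) - 1 > ((nN:Nat):Int)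
              then ((nN:Nat):Int) else ((sN:Nat):Int) + (((P:Nat):Int) - ((sN % P : Nat):Int)) - 1)
            = ((eN:Nat):Int) := by
          rw [heN_def]; split_ifs <;> omega
        rw [he]
        have hsgn : ∀ s', sN ≤ s' → s' ≤ eN → refSgn P bN s' = -1 := by
          intro s' h1 h2
          rw [show s' = sN + (s' - sN) by omega]
          refine refSgn_const_neg P bN sN (s' - sN) (by omega) (by
            have : eN ≤ sN + (P - sN % P) - 1 := by rw [heN_def]; split_ifs <;> omega
            omega)
        have hsum := sumRange_cong m P bN PP nN sN eN hs hse hen hPP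
        have hblock := block_step m P bN (-1) sN eN nN hse hen hsgn _ hsum
        have hrec := ih (eN+1) (val + (-1) *
            (if ((nN:Nat):Int) - ((eN:Nat):Int) = 0 then PySem.List.pyGetD PP (((nN:Nat):Int)-((sN:Nat):Int)) 0
             else PySem.List.pyGetD PP (((nN:Nat):Int)-((sN:Nat):Int)) 0
                  - PySem.List.pyGetD PP ((((nN:Nat):Int)-((eN:Nat):Int)) - 1) 0))
            (by omega) (by omega)
        have hcast : (((eN:Nat):Int) + 1) = (((eN+1 : Nat)):Int) := by omega
        rw [hcast]
        have hsplit := Finset.sum_Ico_consecutive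
          (fun s' => refSgn P bN s' * refS m P bN (nN - s'))
          (show sN ≤ eN+1 by omega) (show eN+1 ≤ nN+1 by omega)
        obtain ⟨u, hu⟩ := hrec
        obtain ⟨v, hv⟩ := hblock
        exact ⟨u + v, by linear_combination hu + hv + hsplit⟩

theorem refT_Ico (m : Int) (P bN : Nat) (n : Nat) :
    ∑ s' ∈ Finset.Ico 1 (n+1), refSgn P bN s' * refS m P bN (n - s') = refT m P bN n := by
  rw [Finset.sum_Ico_eq_sum_range]
  unfold refT
  simp only [Nat.add_sub_cancel]
  refine Finset.sum_congr rfl fun i _ => ?_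
  rw [show 1 + i = i + 1 by omega, show n - (i+1) = n - 1 - i by omega]

theorem refS_of_pos (m : Int) (P bN : Nat) (n : Nat) (h : 1 ≤ n) :
    refS m P bN n = Int.fmod (refT m P bN n) m := by
  obtain ⟨n', rfl⟩ : ∃ n', n = n' + 1 := ⟨n - 1, by omega⟩
  exact refS_succ m P bN n'

theorem aLoop_spec (m : Int) (P bN : Nat) (hP : P = 2*bN) (hB : 2 ≤ bN) (hpow : ∃ t, P = 2^t)
    (NN : Nat) :
    ∀ (d : Nat) (aN : Nat) (SS PP : List Int),
      aN + d = NN + 1 → 1 ≤ aN →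
      SS.length = NN + 1 → PP.length = NN + 1 →
      (∀ j : Nat, j < aN → PySem.List.pyGetD SS (j:Int) 0 = refS m P bN j) →
      (∀ j : Nat, j < aN → PySem.List.pyGetD PP (j:Int) 0 = refPP m P bN j) →
      ∀ j : Nat, j ≤ NN →
        PySem.List.pyGetD
          (((PySem.List.pyRange (aN:Int) ((NN:Int)+1) 1).foldl
            (fun (st : List Int × List Int) n =>
              (PySem.List.pySetD st.1 n
                 (PySem.Int.mod (aInnerA st.2 ((bN:Nat):Int) ((P:Nat):Int) (((P:Nat):Int)-1) n (n.toNat + 1) 1 0) m),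
               PySem.List.pySetD st.2 n
                 (PySem.Int.mod (PySem.List.pyGetD st.2 (n - 1) 0
                    + PySem.Int.mod (aInnerA st.2 ((bN:Nat):Int) ((P:Nat):Int) (((P:Nat):Int)-1) n (n.toNat + 1) 1 0) m) m)))
            (SS, PP)).1) (j:Int) 0 = refS m P bN j := by
  intro d
  induction d with
  | zero =>
    intro aN SS PP hd ha hlS hlP hSS hPP j hj
    rw [PySem.List.pyRange_one_eq_nil (by omega : ((NN:Int)+1) ≤ (aN:Int))]
    exact hSS j (by omega)
  | succ d ih =>
    intro aN SS PP hd ha hlS hlP hSS hPP j hj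
    rw [PySem.List.pyRange_one_cons (by omega : (aN:Int) < (NN:Int)+1)]
    rw [List.foldl_cons]
    -- the new state after processing n = aN
    have htoNat : ((aN:Int)).toNat = aN := Int.toNat_natCast aN
    have hspec := aInnerA_spec m P bN hP hB hpow PP aN hPP (aN + 1) 1 0 (by omega) (by omega)
    have hsn : PySem.Int.mod (aInnerA PP ((bN:Nat):Int) ((P:Nat):Int) (((P:Nat):Int)-1) ((aN:Int)) (aN + 1) 1 0) m
        = refS m P bN aN := by
      have hcong : Int.fmod (aInnerA PP ((bN:Nat):Int) ((P:Nat):Int) (((P:Nat):Int)-1) ((aN:Int)) (aN + 1) 1 0) m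
          = Int.fmod (refT m P bN aN) m := by
        apply fmod_congr
        have h2 : (0:Int) + ∑ s' ∈ Finset.Ico 1 (aN+1), refSgn P bN s' * refS m P bN (aN - s')
            = refT m P bN aN := by rw [zero_add, refT_Ico]
        calc m ∣ aInnerA PP ((bN:Nat):Int) ((P:Nat):Int) (((P:Nat):Int)-1) ((aN:Int)) (aN + 1) ((1:Nat):Int) 0
              - ((0:Int) + ∑ s' ∈ Finset.Ico 1 (aN+1), refSgn P bN s' * refS m P bN (aN - s')) := hspec
          _ = _ := by rw [h2]; norm_num
      show Int.fmod _ m = _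
      rw [hcong, ← refS_of_pos m P bN aN ha]
    have hPPval : PySem.Int.mod (PySem.List.pyGetD PP ((aN:Int) - 1) 0 + refS m P bN aN) m
        = refPP m P bN aN := by
      have hc : ((aN:Int) - 1) = (((aN - 1 : Nat)):Int) := by omega
      rw [hc, hPP (aN - 1) (by omega)]
      obtain ⟨a', rfl⟩ : ∃ a', aN = a' + 1 := ⟨aN - 1, by omega⟩
      simp only [Nat.add_sub_cancel]
      rfl
    have hmain := ih (aN + 1)
      (PySem.List.pySetD SS ((aN:Int)) (refS m P bN aN))
      (PySem.List.pySetD PP ((aN:Int)) (refPP m P bN aN))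
      (by omega) (by omega)
      (by rw [PySem.List.pySetD_of_nonneg _ _ (by omega)] ; simpa using hlS)
      (by rw [PySem.List.pySetD_of_nonneg _ _ (by omega)] ; simpa using hlP)
      (by
        intro j' hj'
        rw [PySem.List.pyGetD_pySetD_natCast SS aN j' _ _ (by omega)]
        by_cases h : j' = aN
        · rw [if_pos h, h]
        · rw [if_neg h]
          exact hSS j' (by omega))
      (by
        intro j' hj'
        rw [PySem.List.pyGetD_pySetD_natCast PP aN j' _ _ (by omega)]
        by_cases h : j' = aN
        · rw [if_pos h, h]
        · rw [if_neg h]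
          exact hPP j' (by omega))
      j hj
    rw [show ((aN:Int)) + 1 = (((aN + 1 : Nat)):Int) by omega] at *
    -- identify the folded state
    simp only [htoNat] at *
    convert hmain using 4
    rw [hsn, hPPval]
theorem A_eq_ref (N k mod : Int) (hN : 0 ≤ N) (hk : 0 < k) :
    S_k_value N k mod = refS mod (2^(k.toNat+1)) (2^k.toNat) N.toNat := by
  obtain ⟨NN, rfl⟩ : ∃ NN : Nat, N = (NN:Int) := ⟨N.toNat, (Int.toNat_of_nonneg hN).symm⟩
  have hk0 : ¬ (k = 0) := by omega
  unfold S_k_value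
  rw [if_neg hk0]
  have hBe : (1 : Int) <<< k.toNat = ((2^k.toNat : Nat) : Int) := by
    rw [Int.shiftLeft_eq]; push_cast; ring
  have hper : ((2^k.toNat : Nat) : Int) <<< (1:Nat) = ((2^(k.toNat+1) : Nat) : Int) := by
    rw [Int.shiftLeft_eq]; push_cast; ring
  have hrepl : (((NN:Int) + 1)).toNat = NN + 1 := by omega
  have hinit : PySem.List.pySetD (List.replicate (NN+1) (0:Int)) 0 1 = 1 :: List.replicate NN 0 := by
    rw [PySem.List.pySetD_of_nonneg _ _ (by norm_num)]
    simp [List.replicate_succ]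
  simp only [hBe, hper, hrepl, hinit, Int.toNat_natCast]
  have hres := aLoop_spec mod (2^(k.toNat+1)) (2^k.toNat) (by rw [pow_succ]; ring)
    (by
      have h2 : (2:Nat)^1 ≤ 2^k.toNat := Nat.pow_le_pow_right (by norm_num) (by omega)
      simpa using h2)
    ⟨k.toNat+1, rfl⟩ NN NN 1 (1 :: List.replicate NN 0) (1 :: List.replicate NN 0)
    (by omega) (le_refl 1) (by simp) (by simp)
    (fun j hj => by
      interval_cases j
      simp [refS])
    (fun j hj => by
      interval_cases j
      simp [refPP])
    NN (le_refl NN)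
  simpa using hres

-- ---------- B-side ----------
theorem pymod_eq_fmod (a b : Int) : PySem.Int.mod a b = Int.fmod a b := rfl

theorem not_dvd_of_pos_lt (Pz x : Int) (h1 : 0 < x) (h2 : x < Pz) : ¬ Pz ∣ x := by
  rintro ⟨t, rfl⟩
  rcases lt_trichotomy t 0 with h|h|h
  · nlinarith
  · rw [h, mul_zero] at h1; exact lt_irrefl _ h1
  · nlinarith

theorem sum_ite_class_window (P : Nat) (f : Nat → Int) (a b : Nat) (c : Int) (j0 : Nat)
    (hmem : a ≤ j0) (hmem2 : j0 < b)
    (hcls : Int.fmod ((j0:Nat):Int) (P:Int) = Int.fmod c (P:Int))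
    (hw : b ≤ a + P) :
    ∑ j ∈ Finset.Ico a b,
        (if Int.fmod ((j:Nat):Int) (P:Int) = Int.fmod c (P:Int) then f j else 0) = f j0 := by
  rw [Finset.sum_eq_single_of_mem j0 (Finset.mem_Ico.mpr ⟨hmem, hmem2⟩)]
  · rw [if_pos hcls]
  · intro j hj hne
    rw [if_neg]
    intro hc
    have hd : (P:Int) ∣ ((j:Nat):Int) - ((j0:Nat):Int) := by
      rw [← fmod_eq_fmod_iff_dvd_sub, hc, hcls]
    simp only [Finset.mem_Ico] at hj
    rcases lt_trichotomy j j0 with h|h|h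
    · refine not_dvd_of_pos_lt (P:Int) (((j0:Nat):Int) - ((j:Nat):Int)) (by omega) (by omega) ?_
      rw [show ((j0:Nat):Int) - ((j:Nat):Int) = -(((j:Nat):Int) - ((j0:Nat):Int)) by ring]
      exact dvd_neg.mpr hd
    · exact hne h
    · exact not_dvd_of_pos_lt (P:Int) (((j:Nat):Int) - ((j0:Nat):Int)) (by omega) (by omega) hd

theorem refW_U_rec (m : Int) (P bN : Nat) (hP : P = 2*bN) (hB : 2 ≤ bN) (n : Nat) :
    refW m P bN n ((n:Int) - (bN:Int))
      = (if bN ≤ n then refS m P bN (n - bN) else 0)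
        + (if P ≤ n then refW m P bN (n - P) (((n - P : Nat):Int) - (bN:Int)) else 0) := by
  by_cases hPn : P ≤ n
  · rw [if_pos (by omega), if_pos hPn]
    unfold refW
    rw [← Finset.sum_range_add_sum_Ico _ (show n - P - 1 ≤ n - 1 by omega)]
    have hcongr : ∀ j ∈ Finset.range (n - P - 1),
        (if Int.fmod ((j:Nat):Int) (P:Int) = Int.fmod ((n:Int) - (bN:Int)) (P:Int)
           then refS m P bN j else 0)
          = (if Int.fmod ((j:Nat):Int) (P:Int) = Int.fmod (((n - P:Nat):Int) - (bN:Int)) (P:Int)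
             then refS m P bN j else 0) := by
      intro j _
      have hcc : Int.fmod ((n:Int) - (bN:Int)) (P:Int)
          = Int.fmod (((n - P:Nat):Int) - (bN:Int)) (P:Int) := by
        rw [fmod_eq_fmod_iff_dvd_sub]
        refine ⟨1, ?_⟩
        push_cast [Nat.cast_sub hPn]
        ring
      rw [hcc]
    rw [Finset.sum_congr rfl hcongr]
    rw [sum_ite_class_window P (refS m P bN) (n - P - 1) (n - 1) _ (n - bN)
        (by omega) (by omega)
        (by
          rw [fmod_eq_fmod_iff_dvd_sub]
          exact ⟨0, by push_cast [Nat.cast_sub (show bN ≤ n by omega)]; ring⟩)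
        (by omega)]
    ring
  · rw [if_neg hPn]
    by_cases hbn : bN ≤ n
    · rw [if_pos hbn]
      unfold refW
      rw [Finset.range_eq_Ico]
      rw [sum_ite_class_window P (refS m P bN) 0 (n-1) _ (n - bN) (by omega) (by omega)
        (by
          rw [fmod_eq_fmod_iff_dvd_sub]
          exact ⟨0, by push_cast [Nat.cast_sub hbn]; ring⟩)
        (by omega)]
      ring
    · rw [if_neg hbn]
      unfold refW
      rw [Finset.sum_eq_zero (fun j hj => ?_)]
      · norm_num
      · simp only [Finset.mem_range] at hj
        rw [if_neg]
        intro hc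
        rw [fmod_eq_fmod_iff_dvd_sub] at hc
        exact not_dvd_of_pos_lt (P:Int) (((j:Nat):Int) - ((n:Int) - (bN:Int)))
          (by omega) (by omega) hc

theorem refW_V_rec (m : Int) (P bN : Nat) (hP : P = 2*bN) (hB : 2 ≤ bN) (n : Nat) :
    refW m P bN n ((n:Int))
      = (if P ≤ n then refS m P bN (n - P) + refW m P bN (n - P) (((n - P : Nat)):Int) else 0) := by
  by_cases hPn : P ≤ n
  · rw [if_pos hPn]
    unfold refW
    rw [← Finset.sum_range_add_sum_Ico _ (show n - P - 1 ≤ n - 1 by omega)]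
    have hcongr : ∀ j ∈ Finset.range (n - P - 1),
        (if Int.fmod ((j:Nat):Int) (P:Int) = Int.fmod ((n:Int)) (P:Int)
           then refS m P bN j else 0)
          = (if Int.fmod ((j:Nat):Int) (P:Int) = Int.fmod (((n - P:Nat)):Int) (P:Int)
             then refS m P bN j else 0) := by
      intro j _
      have hcc : Int.fmod ((n:Int)) (P:Int) = Int.fmod (((n - P:Nat)):Int) (P:Int) := by
        rw [fmod_eq_fmod_iff_dvd_sub]
        refine ⟨1, ?_⟩
        push_cast [Nat.cast_sub hPn]
        ring
      rw [hcc]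
    rw [Finset.sum_congr rfl hcongr]
    rw [sum_ite_class_window P (refS m P bN) (n - P - 1) (n - 1) _ (n - P)
        (by omega) (by omega)
        (by
          rw [fmod_eq_fmod_iff_dvd_sub]
          exact ⟨-1, by push_cast [Nat.cast_sub hPn]; ring⟩)
        (by omega)]
    ring
  · rw [if_neg hPn]
    unfold refW
    rw [Finset.sum_eq_zero (fun j hj => ?_)]
    simp only [Finset.mem_range] at hj
    rw [if_neg]
    intro hc
    rw [fmod_eq_fmod_iff_dvd_sub] at hc
    refine not_dvd_of_pos_lt (P:Int) ((n:Int) - ((j:Nat):Int)) (by omega) (by omega) ?_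
    rw [show (n:Int) - ((j:Nat):Int) = -(((j:Nat):Int) - (n:Int)) by ring]
    exact dvd_neg.mpr hc

theorem bLoop_spec (m : Int) (P bN : Nat) (hP : P = 2*bN) (hB : 2 ≤ bN) (NN : Nat) :
    ∀ (d aN : Nat) (S U V : List Int) (tp : Int),
      aN + d = NN + 1 → 1 ≤ aN → S.length = NN + 1 → U.length = NN + 1 → V.length = NN + 1 →
      (∀ j : Nat, j < aN → PySem.List.pyGetD S (j:Int) 0 = refS m P bN j) →
      (∀ j : Nat, j < aN → PySem.List.pyGetD U (j:Int) 0 = refW m P bN j ((j:Int) - (bN:Int))) →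
      (∀ j : Nat, j < aN → PySem.List.pyGetD V (j:Int) 0 = refW m P bN j ((j:Int))) →
      m ∣ tp - refT m P bN (aN - 1) →
      ∀ j : Nat, j ≤ NN →
        PySem.List.pyGetD
          (((PySem.List.pyRange (aN:Int) ((NN:Int)+1) 1).foldl
            (fun (st : List Int × List Int × List Int × Int) n =>
              (PySem.List.pySetD st.1 n (PySem.Int.mod (PySem.List.pyGetD st.1 (n - 1) 0 + st.2.2.2 - 2 * ((if ((bN:Nat):Int) ≤ n then PySem.List.pyGetD st.1 (n - ((bN:Nat):Int)) 0 else 0)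
                 + (if ((P:Nat):Int) ≤ n then PySem.List.pyGetD st.2.1 (n - ((P:Nat):Int)) 0 else 0)) + 2 * (if ((P:Nat):Int) ≤ n then PySem.List.pyGetD st.1 (n - ((P:Nat):Int)) 0
                    + PySem.List.pyGetD st.2.2.1 (n - ((P:Nat):Int)) 0 else 0)) m),
               PySem.List.pySetD st.2.1 n ((if ((bN:Nat):Int) ≤ n then PySem.List.pyGetD st.1 (n - ((bN:Nat):Int)) 0 else 0)
                 + (if ((P:Nat):Int) ≤ n then PySem.List.pyGetD st.2.1 (n - ((P:Nat):Int)) 0 else 0)),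
               PySem.List.pySetD st.2.2.1 n (if ((P:Nat):Int) ≤ n then PySem.List.pyGetD st.1 (n - ((P:Nat):Int)) 0
                    + PySem.List.pyGetD st.2.2.1 (n - ((P:Nat):Int)) 0 else 0),
               PySem.Int.mod (PySem.List.pyGetD st.1 (n - 1) 0 + st.2.2.2 - 2 * ((if ((bN:Nat):Int) ≤ n then PySem.List.pyGetD st.1 (n - ((bN:Nat):Int)) 0 else 0)
                 + (if ((P:Nat):Int) ≤ n then PySem.List.pyGetD st.2.1 (n - ((P:Nat):Int)) 0 else 0)) + 2 * (if ((P:Nat):Int) ≤ n then PySem.List.pyGetD st.1 (n - ((P:Nat):Int)) 0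
                    + PySem.List.pyGetD st.2.2.1 (n - ((P:Nat):Int)) 0 else 0)) m)) (S, U, V, tp)).1) (j:Int) 0 = refS m P bN j := by
  intro d
  induction d with
  | zero =>
    intro aN S U V tp hd ha hlS hlU hlV hS hU hV htp j hj
    rw [PySem.List.pyRange_one_eq_nil (by omega : ((NN:Int)+1) ≤ (aN:Int))]
    exact hS j (by omega)
  | succ d ih =>
    intro aN S U V tp hd ha hlS hlU hlV hS hU hV htp j hj
    rw [PySem.List.pyRange_one_cons (by omega : (aN:Int) < (NN:Int)+1), List.foldl_cons]
    have hu : ((if ((bN:Nat):Int) ≤ ((aN:Nat):Int) then PySem.List.pyGetD S (((aN:Nat):Int) - ((bN:Nat):Int)) 0 else 0)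
                 + (if ((P:Nat):Int) ≤ ((aN:Nat):Int) then PySem.List.pyGetD U (((aN:Nat):Int) - ((P:Nat):Int)) 0 else 0))
        = refW m P bN aN (((aN:Nat):Int) - ((bN:Nat):Int)) := by
      rw [refW_U_rec m P bN hP hB aN]
      have e1 : (if ((bN:Nat):Int) ≤ ((aN:Nat):Int) then PySem.List.pyGetD S (((aN:Nat):Int) - ((bN:Nat):Int)) 0 else 0)
          = (if bN ≤ aN then refS m P bN (aN - bN) else 0) := by
        by_cases hb : bN ≤ aN
        · rw [if_pos (by exact_mod_cast hb), if_pos hb]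
          rw [show (((aN:Nat):Int) - ((bN:Nat):Int)) = (((aN - bN : Nat)):Int) by omega]
          exact hS _ (by omega)
        · rw [if_neg (by exact_mod_cast hb), if_neg hb]
      have e2 : (if ((P:Nat):Int) ≤ ((aN:Nat):Int) then PySem.List.pyGetD U (((aN:Nat):Int) - ((P:Nat):Int)) 0 else 0)
          = (if P ≤ aN then refW m P bN (aN - P) (((aN - P : Nat):Int) - (bN:Int)) else 0) := by
        by_cases hp : P ≤ aN
        · rw [if_pos (by exact_mod_cast hp), if_pos hp]
          rw [show (((aN:Nat):Int) - ((P:Nat):Int)) = (((aN - P : Nat)):Int) by omega]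
          exact hU _ (by omega)
        · rw [if_neg (by exact_mod_cast hp), if_neg hp]
      rw [e1, e2]
    have hv : (if ((P:Nat):Int) ≤ ((aN:Nat):Int) then PySem.List.pyGetD S (((aN:Nat):Int) - ((P:Nat):Int)) 0
                    + PySem.List.pyGetD V (((aN:Nat):Int) - ((P:Nat):Int)) 0 else 0)
        = refW m P bN aN ((aN:Nat):Int) := by
      rw [refW_V_rec m P bN hP hB aN]
      by_cases hp : P ≤ aN
      · rw [if_pos (by exact_mod_cast hp : ((P:Nat):Int) ≤ ((aN:Nat):Int)), if_pos hp]
        rw [show (((aN:Nat):Int) - ((P:Nat):Int)) = (((aN - P : Nat)):Int) by omega]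
        rw [hS _ (by omega), hV _ (by omega)]
      · rw [if_neg (by exact_mod_cast hp : ¬ ((P:Nat):Int) ≤ ((aN:Nat):Int)), if_neg hp]
    have hSm1 : PySem.List.pyGetD S (((aN:Nat):Int) - 1) 0 = refS m P bN (aN - 1) := by
      rw [show (((aN:Nat):Int) - 1) = (((aN - 1 : Nat)):Int) by omega]
      exact hS _ (by omega)
    have ht : PySem.Int.mod (PySem.List.pyGetD S (((aN:Nat):Int) - 1) 0 + tp - 2 * ((if ((bN:Nat):Int) ≤ ((aN:Nat):Int) then PySem.List.pyGetD S (((aN:Nat):Int) - ((bN:Nat):Int)) 0 else 0)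
                 + (if ((P:Nat):Int) ≤ ((aN:Nat):Int) then PySem.List.pyGetD U (((aN:Nat):Int) - ((P:Nat):Int)) 0 else 0)) + 2 * (if ((P:Nat):Int) ≤ ((aN:Nat):Int) then PySem.List.pyGetD S (((aN:Nat):Int) - ((P:Nat):Int)) 0
                    + PySem.List.pyGetD V (((aN:Nat):Int) - ((P:Nat):Int)) 0 else 0)) m
        = refS m P bN aN := by
      rw [hu, hv, hSm1, pymod_eq_fmod, refS_of_pos m P bN aN ha]
      apply fmod_congr
      have hTs := refT_succ m P bN hP hB (aN - 1)
      rw [show (aN - 1) + 1 = aN by omega] at hTs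
      rw [show (((aN - 1 : Nat)):Int) + 1 = ((aN:Nat):Int) by omega] at hTs
      obtain ⟨w, hw⟩ := htp
      exact ⟨w, by linear_combination hw - hTs⟩
    rw [ht, hu, hv]
    have hmain := ih (aN + 1)
      (PySem.List.pySetD S ((aN:Nat):Int) (refS m P bN aN))
      (PySem.List.pySetD U ((aN:Nat):Int) (refW m P bN aN (((aN:Nat):Int) - ((bN:Nat):Int))))
      (PySem.List.pySetD V ((aN:Nat):Int) (refW m P bN aN ((aN:Nat):Int)))
      (refS m P bN aN)
      (by omega) (by omega)
      (by rw [PySem.List.pySetD_of_nonneg _ _ (by omega)]; simpa using hlS)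
      (by rw [PySem.List.pySetD_of_nonneg _ _ (by omega)]; simpa using hlU)
      (by rw [PySem.List.pySetD_of_nonneg _ _ (by omega)]; simpa using hlV)
      (by
        intro j' hj'
        rw [PySem.List.pyGetD_pySetD_natCast S aN j' _ _ (by omega)]
        by_cases h : j' = aN
        · rw [if_pos h, h]
        · rw [if_neg h]
          exact hS j' (by omega))
      (by
        intro j' hj'
        rw [PySem.List.pyGetD_pySetD_natCast U aN j' _ _ (by omega)]
        by_cases h : j' = aN
        · rw [if_pos h, h]
        · rw [if_neg h]
          exact hU j' (by omega))
      (by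
        intro j' hj'
        rw [PySem.List.pyGetD_pySetD_natCast V aN j' _ _ (by omega)]
        by_cases h : j' = aN
        · rw [if_pos h, h]
        · rw [if_neg h]
          exact hV j' (by omega))
      (by
        rw [show (aN + 1) - 1 = aN by omega]
        rw [refS_of_pos m P bN aN ha]
        have h := fmod_sub_self_dvd m (refT m P bN aN)
        have h2 : Int.fmod (refT m P bN aN) m - refT m P bN aN
            = -(refT m P bN aN - Int.fmod (refT m P bN aN) m) := by ring
        rw [h2]
        exact dvd_neg.mpr h)
      j hj
    rw [show ((aN:Nat):Int) + 1 = (((aN + 1 : Nat)):Int) by omega]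
    exact hmain

theorem B_eq_ref (N k mod : Int) (hN : 0 ≤ N) (hk : 0 < k) :
    S_k_value_alt N k mod = refS mod (2^(k.toNat+1)) (2^k.toNat) N.toNat := by
  obtain ⟨NN, rfl⟩ : ∃ NN : Nat, N = (NN:Int) := ⟨N.toNat, (Int.toNat_of_nonneg hN).symm⟩
  have hk0 : ¬ (k = 0) := by omega
  unfold S_k_value_alt
  rw [if_neg hk0]
  have hBe : (1 : Int) <<< k.toNat = ((2^k.toNat : Nat) : Int) := by
    rw [Int.shiftLeft_eq]; push_cast; ring
  have hper2 : (2:Int) * ((2^k.toNat : Nat) : Int) = ((2^(k.toNat+1) : Nat) : Int) := by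
    push_cast; ring
  have hrepl : (((NN:Int) + 1)).toNat = NN + 1 := by omega
  have hinit : PySem.List.pySetD (List.replicate (NN+1) (0:Int)) 0 1 = 1 :: List.replicate NN 0 := by
    rw [PySem.List.pySetD_of_nonneg _ _ (by norm_num)]
    simp [List.replicate_succ]
  simp only [hBe, hper2, hrepl, hinit]
  have hres := bLoop_spec mod (2^(k.toNat+1)) (2^k.toNat) (by rw [pow_succ]; ring)
    (by
      have h2 : (2:Nat)^1 ≤ 2^k.toNat := Nat.pow_le_pow_right (by norm_num) (by omega)
      simpa using h2)
    NN NN 1 (1 :: List.replicate NN 0) (List.replicate (NN+1) 0) (List.replicate (NN+1) 0) 0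
    (by omega) (le_refl 1) (by simp) (by simp) (by simp)
    (fun j hj => by
      interval_cases j
      simp [refS])
    (fun j hj => by
      interval_cases j
      simp [refW, List.replicate_succ, PySem.List.pyGetD_zero_cons])
    (fun j hj => by
      interval_cases j
      simp [refW, List.replicate_succ, PySem.List.pyGetD_zero_cons])
    (by simp [refT])
    NN (le_refl NN)
  simpa using hres

-- ===== VERDICT (by name: the statement is the Claim_ definition above) =====
theorem S_k_value_spec : Claim_equal_S_k_value := by
  intro N k mod _hD hPre
  obtain ⟨hN, hk, _hm⟩ := hPre
  unfold Spec_S_k_value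
  by_cases hk0 : k = 0
  · unfold S_k_value S_k_value_alt
    simp [hk0]
  · have hkpos : 0 < k := lt_of_le_of_ne hk (Ne.symm hk0)
    rw [A_eq_ref N k mod hN hkpos, B_eq_ref N k mod hN hkpos]
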